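-- pv_equiv track=rewrite | github.com/korenkaplan/Dev-Skill-Compass-Server | logic/data_processing/tests/test_data_aggregation.py | compare_lengths
-- ===== SOURCE A (Python) =====
-- def compare_lengths(data_structures: list):
--     """A function that assert lengths of data structures"""
--     length_to_compare = len(data_structures[0])
--     if len(data_structures) == 1:
--         return True
--     for item in data_structures[1:]:
--         if len(item) != length_to_compare:
--             return False
--     return True
-- ===== SOURCE B (Python) =====
-- def compare_lengths(data_structures: list):
--     """A function that assert lengths of data structures"""
--     return len({len(x) for x in data_structures}) == 1
-- ===== Notes on version B (the rewrite author's own statement) =====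
-- stated objective: idiomatic
-- what changed: B collects the distinct lengths into one set and checks that exactly one distinct length exists, replacing A's compare-against-the-first scan with early exit.
-- crash fix: On the empty list A raises IndexError (it indexes data_structures[0]) while B returns False (no list has a single distinct length). — e.g. on compare_lengths([]): A raises IndexError, B returns false
import Mathlib
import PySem

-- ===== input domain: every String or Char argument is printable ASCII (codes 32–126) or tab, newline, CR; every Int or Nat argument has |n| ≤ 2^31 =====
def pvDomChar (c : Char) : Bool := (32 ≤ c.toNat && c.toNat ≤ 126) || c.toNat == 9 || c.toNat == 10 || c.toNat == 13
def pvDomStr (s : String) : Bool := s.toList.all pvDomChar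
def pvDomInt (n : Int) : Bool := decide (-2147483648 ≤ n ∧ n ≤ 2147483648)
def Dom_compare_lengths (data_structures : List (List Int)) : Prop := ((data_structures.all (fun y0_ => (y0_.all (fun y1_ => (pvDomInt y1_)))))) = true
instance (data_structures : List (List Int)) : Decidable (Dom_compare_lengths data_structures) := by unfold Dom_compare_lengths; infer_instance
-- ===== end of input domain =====

-- B checks that the set of element lengths has exactly one distinct member (idiomatic); A compares each length to the first with early exit.

-- ===== PORT A =====
def compare_lengths (data_structures : List (List Int)) : Bool :=
  match data_structures with
  | [] => false  -- data_structures[0] raises IndexError here; excluded by Pre_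
  | d0 :: rest =>
    let length_to_compare : Int := d0.length
    if data_structures.length == 1 then true
    else rest.all (fun item => (item.length : Int) == length_to_compare)

-- ===== PORT B =====
def compare_lengths_alt (data_structures : List (List Int)) : Bool :=
  PySem.Set.len (PySem.Set.ofList (data_structures.map (fun x => (x.length : Int)))) == 1

-- ===== PRECONDITION & SPEC =====
-- Pre_ excludes exactly the empty list, on which A raises IndexError.
def Pre_compare_lengths (data_structures : List (List Int)) : Prop := data_structures ≠ []
instance (data_structures : List (List Int)) : Decidable (Pre_compare_lengths data_structures) := by unfold Pre_compare_lengths; infer_instance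
def pvWitness_compare_lengths : List (List Int) := [[1, 2], [3, 4]]

-- On the empty list A raises IndexError (it indexes data_structures[0]) while B returns False.
def Raises_compare_lengths (data_structures : List (List Int)) : Prop := data_structures = []
instance (data_structures : List (List Int)) : Decidable (Raises_compare_lengths data_structures) := by unfold Raises_compare_lengths; infer_instance
def pvRaiseWitness_compare_lengths : List (List Int) := []
def pvRaiseWitnessOut_compare_lengths : Bool := false

def Spec_compare_lengths (data_structures : List (List Int)) (out : Bool) : Prop := out = compare_lengths_alt data_structures
instance (data_structures : List (List Int)) (out : Bool) : Decidable (Spec_compare_lengths data_structures out) := by unfold Spec_compare_lengths; infer_instance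

-- ===== CLAIM =====
def Claim_equal_compare_lengths : Prop := ∀ (data_structures : List (List Int)), Dom_compare_lengths data_structures → Pre_compare_lengths data_structures → Spec_compare_lengths data_structures (compare_lengths data_structures)
def Claim_raises_compare_lengths : Prop := (∀ (data_structures : List (List Int)), Dom_compare_lengths data_structures → Raises_compare_lengths data_structures → ¬ Pre_compare_lengths data_structures) ∧ (Dom_compare_lengths (pvRaiseWitness_compare_lengths) ∧ Raises_compare_lengths (pvRaiseWitness_compare_lengths) ∧ compare_lengths_alt (pvRaiseWitness_compare_lengths) = pvRaiseWitnessOut_compare_lengths)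

-- ===== LEMMAS AND PROOFS =====

-- the distinct-length set of a nonempty list is the singleton [a] iff every further length equals a
theorem ofList_cons_eq_singleton (a : Int) (l : List Int) (h : ∀ x ∈ l, x = a) :
    PySem.Set.ofList (a :: l) = [a] := by
  induction l with
  | nil => rfl
  | cons x l ih =>
    have hx : x = a := h x (by simp)
    have h' : ∀ y ∈ l, y = a := fun y hy => h y (by simp [hy])
    have : PySem.Set.ofList (a :: x :: l) = PySem.Set.ofList (a :: l) := by
      subst hx
      simp [PySem.Set.ofList_eq_foldl, PySem.Set.add, PySem.Set.contains, List.foldl]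
    rw [this]; exact ih h'

theorem len_ofList_cons_eq_one (a : Int) (l : List Int) :
    ((PySem.Set.ofList (a :: l)).length = 1) ↔ (∀ x ∈ l, x = a) := by
  constructor
  · intro h1 x hx
    have hmem : x ∈ PySem.Set.ofList (a :: l) := by
      rw [PySem.Set.mem_ofList]; simp [hx]
    have hamem : a ∈ PySem.Set.ofList (a :: l) := by
      rw [PySem.Set.mem_ofList]; simp
    match hS : PySem.Set.ofList (a :: l), h1 with
    | [c], _ =>
      rw [hS] at hmem hamem
      simp at hmem hamem; omega
  · intro h
    rw [ofList_cons_eq_singleton a l h]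
    rfl

-- ===== VERDICT =====
theorem compare_lengths_spec : Claim_equal_compare_lengths := by
  intro ds _hdom hpre
  unfold Spec_compare_lengths compare_lengths compare_lengths_alt
  match ds with
  | [] => exact absurd rfl hpre
  | d0 :: rest =>
    simp only [List.map_cons, PySem.Set.len]
    have := len_ofList_cons_eq_one (d0.length : Int) (rest.map (fun x => (x.length : Int)))
    rcases rest with _ | ⟨r, rs⟩
    · simp [ofList_cons_eq_singleton]
    · simp only [List.length_cons]
      rw [if_neg (by simp)]
      have hiff := len_ofList_cons_eq_one (d0.length : Int) ((r :: rs).map (fun x => (x.length : Int)))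
      rw [Bool.eq_iff_iff]
      simp only [List.all_eq_true, beq_iff_eq, Nat.cast_eq_one, List.mem_map,
        forall_exists_index, and_imp, forall_apply_eq_imp_iff₂] at hiff ⊢
      exact hiff.symm

def compare_lengths_raises : Claim_raises_compare_lengths := by
  unfold Claim_raises_compare_lengths
  exact ⟨fun ds _ h => by simp [Raises_compare_lengths] at h; simp [h, Pre_compare_lengths], by decide⟩
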